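-- pv_equiv track=rewrite | github.com/TDevViper/Astra_Presonal_ai | backend/core/auto_debug.py | _extract_core_error
-- ===== SOURCE A (Python) =====
-- def _extract_core_error(text: str) -> str:
--     """Pull the most meaningful line from an error block."""
--     import re
--
--     # Try to get the last traceback line
--     lines = [ln.strip() for ln in text.split("\n") if ln.strip()]
--     for line in reversed(lines):
--         if any(
--             w in line
--             for w in [
--                 "Error:",
--                 "Exception:",
--                 "TypeError",
--                 "ValueError",
--                 "AttributeError",
--                 "ImportError",
--                 "KeyError",
--                 "NameError",
--                 "SyntaxError",
--                 "RuntimeError",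
--             ]
--         ):
--             return line[:200]
--     # Fallback: first non-trivial line
--     for line in lines:
--         if len(line) > 10:
--             return line[:200]
--     return text[:200]
-- ===== SOURCE B (Python) =====
-- def _extract_core_error(text: str) -> str:
--     """Pull the most meaningful line from an error block."""
--     KEYWORDS = (
--         "Error:", "Exception:", "TypeError", "ValueError", "AttributeError",
--         "ImportError", "KeyError", "NameError", "SyntaxError", "RuntimeError",
--     )
--     last_error = None
--     first_long = None
--     for raw in text.split("\n"):
--         line = raw.strip()
--         if not line:
--             continue
--         if any(w in line for w in KEYWORDS):
--             last_error = line
--         if first_long is None and len(line) > 10: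
--             first_long = line
--     if last_error is not None:
--         return last_error[:200]
--     if first_long is not None:
--         return first_long[:200]
--     return text[:200]
-- ===== Notes on version B (the rewrite author's own statement) =====
-- stated objective: alternative
-- what changed: Replaces the build-list-then-two-scans (reversed keyword scan, then forward long-line scan) with a single forward pass over the split lines that maintains two accumulators (last keyword-bearing line, first long line) and never materialises the stripped list.
import Mathlib
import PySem

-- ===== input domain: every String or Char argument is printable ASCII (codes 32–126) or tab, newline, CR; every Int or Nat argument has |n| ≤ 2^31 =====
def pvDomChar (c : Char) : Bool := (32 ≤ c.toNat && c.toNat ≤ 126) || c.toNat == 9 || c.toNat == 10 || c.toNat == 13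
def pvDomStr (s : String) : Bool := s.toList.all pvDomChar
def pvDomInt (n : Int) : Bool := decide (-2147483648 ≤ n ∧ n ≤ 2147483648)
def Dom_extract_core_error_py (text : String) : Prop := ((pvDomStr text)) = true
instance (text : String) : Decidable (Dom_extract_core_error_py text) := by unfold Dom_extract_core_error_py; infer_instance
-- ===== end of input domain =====

-- B: one forward pass with two accumulators instead of A's stripped-list build plus two separate scans.

-- the keyword tuple, shared verbatim by both Pythons
def pvKeywords : List String :=
  ["Error:", "Exception:", "TypeError", "ValueError", "AttributeError",
   "ImportError", "KeyError", "NameError", "SyntaxError", "RuntimeError"]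

-- any(w in line for w in KEYWORDS)
def pvHasKw (line : String) : Bool := pvKeywords.any (fun w => PySem.Str.isIn w line)

-- ===== PORT A =====
def extract_core_error_py (text : String) : String :=
  -- lines = [ln.strip() for ln in text.split("\n") if ln.strip()]
  let lines := (((PySem.Str.split? text "\n").getD []).map PySem.Str.strip).filter (fun l => l ≠ "")
  -- for line in reversed(lines): if any(...): return line[:200]
  match lines.reverse.find? pvHasKw with
  | some line => PySem.Str.slice line none (some 200)
  | none =>
    -- for line in lines: if len(line) > 10: return line[:200]
    match lines.find? (fun l => 10 < PySem.Str.len l) with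
    | some line => PySem.Str.slice line none (some 200)
    | none => PySem.Str.slice text none (some 200)

-- ===== PORT B =====
-- the body run on a non-empty stripped line: state = (last_error, first_long)
def pvStepLine (st : Option String × Option String) (line : String) : Option String × Option String :=
  ((if pvHasKw line then some line else st.1),
   (if st.2 = none ∧ 10 < PySem.Str.len line then some line else st.2))

-- the loop body on a raw split part: strip, skip if empty
def pvStepB (st : Option String × Option String) (raw : String) : Option String × Option String :=
  let line := PySem.Str.strip raw
  if line = "" then st else pvStepLine st line

def extract_core_error_py_alt (text : String) : String :=
  let st := ((PySem.Str.split? text "\n").getD []).foldl pvStepB (none, none)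
  match st.1 with
  | some l => PySem.Str.slice l none (some 200)
  | none =>
    match st.2 with
    | some l => PySem.Str.slice l none (some 200)
    | none => PySem.Str.slice text none (some 200)

-- ===== PRECONDITION & SPEC =====
def Spec_extract_core_error_py (text : String) (out : String) : Prop := out = extract_core_error_py_alt text
instance (text : String) (out : String) : Decidable (Spec_extract_core_error_py text out) := by unfold Spec_extract_core_error_py; infer_instance

-- ===== CLAIM (what is proved, stated in full; the proofs are below) =====
def Claim_equal_extract_core_error_py : Prop := ∀ (text : String), Dom_extract_core_error_py text → Spec_extract_core_error_py text (extract_core_error_py text)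

-- ===== LEMMAS AND PROOFS =====

-- the fold over raw split parts equals a fold over the stripped, non-empty lines
theorem pv_fold_raw_eq_fold_lines (parts : List String) (st : Option String × Option String) :
    parts.foldl pvStepB st
      = (((parts.map PySem.Str.strip).filter (fun l => l ≠ "")).foldl pvStepLine st) := by
  induction parts generalizing st with
  | nil => rfl
  | cons p ps ih =>
      simp only [List.foldl_cons, List.map_cons, List.filter_cons]
      by_cases h : PySem.Str.strip p = "" <;> simp [pvStepB, h, ih]

-- first component of the fold: the "last keyword line" accumulator
theorem pv_fold_fst (lines : List String) (st : Option String × Option String) :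
    (lines.foldl pvStepLine st).1
      = lines.foldl (fun a l => if pvHasKw l then some l else a) st.1 := by
  induction lines generalizing st with
  | nil => rfl
  | cons l ls ih => simp only [List.foldl_cons]; exact ih _

-- second component of the fold: the "first long line" accumulator
theorem pv_fold_snd (lines : List String) (st : Option String × Option String) :
    (lines.foldl pvStepLine st).2
      = lines.foldl (fun a l => if a = none ∧ 10 < PySem.Str.len l then some l else a) st.2 := by
  induction lines generalizing st with
  | nil => rfl
  | cons l ls ih => simp only [List.foldl_cons]; exact ih _

-- overwriting accumulator = first match of the reversed list
theorem pv_last_eq_reverse_find (l : List String) (a : Option String) :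
    l.foldl (fun acc x => if pvHasKw x then some x else acc) a
      = match l.reverse.find? pvHasKw with
        | some x => some x
        | none => a := by
  induction l generalizing a with
  | nil => rfl
  | cons x xs ih =>
      simp only [List.foldl_cons, List.reverse_cons, List.find?_append, ih]
      cases h : xs.reverse.find? pvHasKw
      · simp; by_cases hp : pvHasKw x <;> simp [hp]
      · simp

-- a set "first" accumulator never changes
theorem pv_first_some (l : List String) (v : String) :
    l.foldl (fun acc x => if acc = none ∧ 10 < PySem.Str.len x then some x else acc) (some v) = some v := by
  induction l with
  | nil => rfl
  | cons x xs ih => rw [List.foldl_cons, if_neg (by simp)]; exact ih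

-- set-once accumulator = first match
theorem pv_first_eq_find (l : List String) :
    l.foldl (fun acc x => if acc = none ∧ 10 < PySem.Str.len x then some x else acc) none
      = l.find? (fun x => 10 < PySem.Str.len x) := by
  induction l with
  | nil => rfl
  | cons x xs ih =>
      by_cases hq : 10 < PySem.Str.len x
      · rw [List.foldl_cons, if_pos ⟨rfl, hq⟩, pv_first_some]
        simp at hq
        simp [hq]
      · rw [List.foldl_cons, if_neg (fun hc => hq hc.2), ih]
        simp at hq
        simp [hq]

-- ===== VERDICT (by name: the statement is the Claim_ definition above) =====
theorem extract_core_error_py_spec : Claim_equal_extract_core_error_py := by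
  intro text _
  show extract_core_error_py text = extract_core_error_py_alt text
  unfold extract_core_error_py extract_core_error_py_alt
  simp only [pv_fold_raw_eq_fold_lines, pv_fold_fst, pv_fold_snd,
      pv_last_eq_reverse_find, pv_first_eq_find]
  cases h1 : ((((PySem.Str.split? text "\n").getD []).map PySem.Str.strip).filter (fun l => l ≠ "")).reverse.find? pvHasKw
  · cases h2 : ((((PySem.Str.split? text "\n").getD []).map PySem.Str.strip).filter (fun l => l ≠ "")).find? (fun l => 10 < PySem.Str.len l) <;> simp
  · simp
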